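-- pv_equiv track=rewrite | github.com/Evelvo/AutoRuterAI | test_more.py | find_highest_number
-- ===== SOURCE A (Python) =====
-- def find_highest_number(lst):
--     highest_num = None
--     direction = None
--     for idx, sub_lst in enumerate(lst):
--         for jdx, num in enumerate(sub_lst):
--             if highest_num is None or num > highest_num:
--                 highest_num = num
--                 direction = [idx, jdx]
--     return direction
-- ===== SOURCE B (Python) =====
-- def find_highest_number(lst):
--     # Stage 1: find the maximum VALUE over the flattened input.
--     flat = [n for sub in lst for n in sub]
--     if not flat:
--         return None
--     m = max(flat)
--     # Stage 2: locate the first occurrence of that value.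
--     for i, sub in enumerate(lst):
--         if m in sub:
--             return [i, sub.index(m)]
-- ===== Notes on version B (the rewrite author's own statement) =====
-- stated objective: alternative
-- what changed: Replaces the single nested running-max loop that tracks coordinates incrementally by two staged passes: first compute only the maximum value over the flattened input, then search for its first occurrence with membership test and list.index.
import Mathlib
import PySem

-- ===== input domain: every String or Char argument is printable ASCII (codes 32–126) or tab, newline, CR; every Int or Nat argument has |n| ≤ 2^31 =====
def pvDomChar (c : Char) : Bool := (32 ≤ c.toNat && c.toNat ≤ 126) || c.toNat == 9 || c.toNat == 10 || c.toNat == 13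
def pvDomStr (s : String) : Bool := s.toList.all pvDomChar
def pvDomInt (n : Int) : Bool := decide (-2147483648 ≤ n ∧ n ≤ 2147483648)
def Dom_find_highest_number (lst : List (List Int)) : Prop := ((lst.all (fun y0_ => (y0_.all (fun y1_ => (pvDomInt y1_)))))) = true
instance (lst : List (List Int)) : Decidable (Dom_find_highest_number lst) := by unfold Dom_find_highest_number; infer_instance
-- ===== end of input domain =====

-- B replaces A's single nested coordinate-tracking max loop by two staged passes:
-- first the maximum value of the flattened input, then the first position of that value
-- (alternative decomposition; same cost).

-- ===== PORT A =====
-- literal transliteration: nested for-loops over enumerate, state (highest_num, direction)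
def find_highest_number (lst : List (List Int)) : Option (List Int) :=
  let st : Option Int × Option (List Int) :=
    (PySem.List.enumerate lst).foldl
      (fun s p =>
        (PySem.List.enumerate p.2).foldl
          (fun (s : Option Int × Option (List Int)) q =>
            match s.1 with
            | none => (some q.2, some [p.1, q.1])
            | some h => if q.2 > h then (some q.2, some [p.1, q.1]) else s)
          s)
      (none, none)
  st.2

-- ===== PORT B =====
-- Source B stage 2: the for-loop with `if m in sub: return [i, sub.index(m)]`
-- (sub.index never raises here since the guard ensures membership)
def pvFindRow (m : Int) : List (List Int) → Int → Option (List Int)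
  | [], _ => none
  | sub :: rest, i =>
    if m ∈ sub then (PySem.List.index? sub m).map (fun (j : Nat) => [i, (j : Int)])
    else pvFindRow m rest (i + 1)

-- literal transliteration of Source B: flatten, max value, then locate first occurrence
def find_highest_number_alt (lst : List (List Int)) : Option (List Int) :=
  let flat := lst.flatMap (fun sub => sub)
  if flat = [] then none
  else
    match PySem.List.max? flat (fun x => x) with
    | none => none
    | some m => pvFindRow m lst 0

-- ===== PRECONDITION & SPEC =====
def Spec_find_highest_number (lst : List (List Int)) (out : Option (List Int)) : Prop := out = find_highest_number_alt lst
instance (lst : List (List Int)) (out : Option (List Int)) : Decidable (Spec_find_highest_number lst out) := by unfold Spec_find_highest_number; infer_instance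

-- ===== CLAIM =====
def Claim_equal_find_highest_number : Prop := ∀ (lst : List (List Int)), Dom_find_highest_number lst → Spec_find_highest_number lst (find_highest_number lst)

-- ===== LEMMAS AND PROOFS =====

-- the flattened candidate table (value, row, column) both programs can be related to
def pvCands (lst : List (List Int)) (k : Int) : List (Int × Int × Int) :=
  (PySem.List.enumerate lst k).flatMap
    (fun p => (PySem.List.enumerate p.2).map (fun q => (q.2, p.1, q.1)))

-- A's inner-loop step, on candidates
def pvStepB (acc : Option (Int × Int × Int)) (x : Int × Int × Int) : Option (Int × Int × Int) :=
  match acc with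
  | none => some x
  | some m => if m.1 < x.1 then some x else some m

-- relation between A's state pair and the candidate accumulator
def pvRel (s : Option Int × Option (List Int)) (o : Option (Int × Int × Int)) : Prop :=
  s = (o.map (fun t => t.1), o.map (fun t => [t.2.1, t.2.2]))

-- leftmost maximal candidate (what the pvStepB fold computes from some t)
def pvPick (t : Int × Int × Int) : List (Int × Int × Int) → (Int × Int × Int)
  | [] => t
  | x :: xs => pvPick (if t.1 < x.1 then x else t) xs

-- first candidate with value m
def pvFindc (m : Int) : List (Int × Int × Int) → Option (Int × Int × Int)
  | [] => none
  | x :: xs => if x.1 = m then some x else pvFindc m xs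

-- ---- A-side: nested loops = pvStepB fold over pvCands ----

theorem pv_inner (i : Int) (sub : List Int) : ∀ (k : Int)
    (s : Option Int × Option (List Int)) (o : Option (Int × Int × Int)), pvRel s o →
    pvRel
      ((PySem.List.enumerate sub k).foldl
        (fun (s : Option Int × Option (List Int)) q =>
          match s.1 with
          | none => (some q.2, some [i, q.1])
          | some h => if q.2 > h then (some q.2, some [i, q.1]) else s)
        s)
      (((PySem.List.enumerate sub k).map (fun q => (q.2, i, q.1))).foldl pvStepB o) := by
  induction sub with
  | nil => intro k s o h; simpa [PySem.List.enumerate] using h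
  | cons n rest ih =>
    intro k s o h
    rw [PySem.List.enumerate_cons]
    simp only [List.foldl_cons, List.map_cons]
    apply ih
    cases o with
    | none => simp [pvRel] at h; simp [pvRel, h, pvStepB]
    | some m =>
      simp [pvRel] at h
      simp [pvRel, h, pvStepB]
      by_cases hc : m.1 < n
      · simp [hc]
      · simp [hc]

theorem pv_outer (lst : List (List Int)) : ∀ (k : Int)
    (s : Option Int × Option (List Int)) (o : Option (Int × Int × Int)), pvRel s o →
    pvRel
      ((PySem.List.enumerate lst k).foldl
        (fun s p =>
          (PySem.List.enumerate p.2).foldl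
            (fun (s : Option Int × Option (List Int)) q =>
              match s.1 with
              | none => (some q.2, some [p.1, q.1])
              | some h => if q.2 > h then (some q.2, some [p.1, q.1]) else s)
            s)
        s)
      ((pvCands lst k).foldl pvStepB o) := by
  induction lst with
  | nil => intro k s o h; simpa [pvCands, PySem.List.enumerate] using h
  | cons sub rest ih =>
    intro k s o h
    rw [PySem.List.enumerate_cons]
    simp only [pvCands, PySem.List.enumerate_cons, List.foldl_cons, List.flatMap_cons,
      List.foldl_append]
    exact ih _ _ _ (pv_inner k sub 0 s o h)

-- ---- pvStepB fold = pvPick ----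

theorem pv_foldl_pick (xs : List (Int × Int × Int)) : ∀ (t : Int × Int × Int),
    xs.foldl pvStepB (some t) = some (pvPick t xs) := by
  induction xs with
  | nil => intro t; rfl
  | cons x rest ih =>
    intro t
    simp only [List.foldl_cons, pvStepB, pvPick]
    by_cases hc : t.1 < x.1 <;> simp [hc, ih]

-- pvPick only grows the value
theorem pv_le_pick (xs : List (Int × Int × Int)) : ∀ (t : Int × Int × Int),
    t.1 ≤ (pvPick t xs).1 := by
  induction xs with
  | nil => intro t; simp [pvPick]
  | cons x rest ih =>
    intro t
    simp only [pvPick]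
    by_cases hc : t.1 < x.1
    · simp only [hc, if_pos]
      exact le_trans (le_of_lt hc) (ih x)
    · simp only [hc, if_neg, not_false_iff]
      exact ih t

-- pvPick's result is the FIRST candidate carrying its value
theorem pv_pick_findc (xs : List (Int × Int × Int)) : ∀ (t : Int × Int × Int),
    pvFindc (pvPick t xs).1 (t :: xs) = some (pvPick t xs) := by
  induction xs with
  | nil => intro t; simp [pvPick, pvFindc]
  | cons x rest ih =>
    intro t
    simp only [pvPick]
    by_cases hc : t.1 < x.1
    · simp only [hc, if_pos]
      have hle : x.1 ≤ (pvPick x rest).1 := pv_le_pick rest x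
      have hne : t.1 ≠ (pvPick x rest).1 := by omega
      have := ih x
      simp only [pvFindc] at this ⊢
      simp [hne, this]
    · simp only [hc, if_neg, not_false_iff]
      have := ih t
      simp only [pvFindc] at this ⊢
      by_cases ht : t.1 = (pvPick t rest).1
      · simp [ht] at this ⊢; exact this
      · have hle : t.1 ≤ (pvPick t rest).1 := pv_le_pick rest t
        have hx : ¬ x.1 = (pvPick t rest).1 := by omega
        simp [ht, hx] at this ⊢; exact this

-- ---- values of the candidate table = the flattened list ----

theorem pv_cands_map_fst (lst : List (List Int)) : ∀ (k : Int),
    (pvCands lst k).map (fun t => t.1) = lst.flatMap (fun sub => sub) := by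
  induction lst with
  | nil => intro k; simp [pvCands, PySem.List.enumerate]
  | cons sub rest ih =>
    intro k
    simp only [pvCands, PySem.List.enumerate_cons, List.flatMap_cons, List.map_append,
      List.map_map]
    have hrow : List.map ((fun (t : Int × Int × Int) => t.1) ∘ fun (q : Int × Int) => (q.2, k, q.1))
        (PySem.List.enumerate sub) = sub := PySem.List.map_snd_enumerate sub 0
    rw [hrow]
    have := ih (k + 1)
    simp only [pvCands] at this
    rw [this]

-- ---- max of flat = value of pvPick ----

theorem pv_foldl_max_pick (xs : List (Int × Int × Int)) : ∀ (t : Int × Int × Int),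
    (xs.map (fun y => y.1)).foldl max t.1 = (pvPick t xs).1 := by
  induction xs with
  | nil => intro t; simp [pvPick]
  | cons x rest ih =>
    intro t
    simp only [List.map_cons, List.foldl_cons, pvPick]
    by_cases hc : t.1 < x.1
    · rw [max_eq_right (le_of_lt hc)]; simp only [hc, if_pos]; exact ih x
    · rw [max_eq_left (by omega)]; simp only [hc, if_neg, not_false_iff]; exact ih t

-- ---- B-side: pvFindRow = pvFindc over the candidate table ----

theorem pv_findc_row (m i : Int) (sub : List Int) : ∀ (k : Int),
    pvFindc m ((PySem.List.enumerate sub k).map (fun q => (q.2, i, q.1)))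
      = (PySem.List.index? sub m).map (fun (j : Nat) => (m, i, k + (j : Int))) := by
  induction sub with
  | nil => intro k; simp [PySem.List.enumerate, pvFindc, PySem.List.index?_eq_idxOf?]
  | cons n rest ih =>
    intro k
    rw [PySem.List.enumerate_cons]
    simp only [List.map_cons, pvFindc]
    by_cases hn : n = m
    · subst hn
      rw [PySem.List.index?_cons_self]
      simp
    · rw [PySem.List.index?_cons_of_ne rest hn]
      simp only [if_neg hn, ih (k + 1), Option.map_map]
      cases PySem.List.index? rest m with
      | none => simp
      | some j => simp [Function.comp]; omega

theorem pv_findc_append (m : Int) (a b : List (Int × Int × Int)) :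
    pvFindc m (a ++ b) = ((pvFindc m a).or (pvFindc m b)) := by
  induction a with
  | nil => simp [pvFindc]
  | cons x xs ih =>
    simp only [List.cons_append, pvFindc]
    by_cases hx : x.1 = m <;> simp [hx, ih]

theorem pv_findrow_findc (m : Int) (lst : List (List Int)) : ∀ (k : Int),
    pvFindRow m lst k = (pvFindc m (pvCands lst k)).map (fun t => [t.2.1, t.2.2]) := by
  induction lst with
  | nil => intro k; simp [pvFindRow, pvCands, PySem.List.enumerate, pvFindc]
  | cons sub rest ih =>
    intro k
    simp only [pvFindRow, pvCands, PySem.List.enumerate_cons, List.flatMap_cons,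
      pv_findc_append]
    rw [pv_findc_row m k sub 0]
    by_cases hm : m ∈ sub
    · have hs : ∃ j, PySem.List.index? sub m = some j := by
        rcases Option.isSome_iff_exists.mp ((PySem.List.index?_isSome_iff sub m).mpr hm) with ⟨j, hj⟩
        exact ⟨j, hj⟩
      rcases hs with ⟨j, hj⟩
      rw [PySem.List.index?_eq_idxOf?] at hj
      simp [hm, hj]
    · have hn : PySem.List.index? sub m = none := (PySem.List.index?_eq_none_iff sub m).mpr hm
      simp only [hn, Option.map_none, Option.none_or, if_neg hm]
      have := ih (k + 1)
      simp only [pvCands] at this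
      exact this

-- ===== VERDICT =====
theorem find_highest_number_spec : Claim_equal_find_highest_number := by
  intro lst _
  have hA := pv_outer lst 0 (none, none) none (by simp [pvRel])
  simp only [pvRel] at hA
  unfold Spec_find_highest_number find_highest_number find_highest_number_alt
  have hflat : lst.flatMap (fun sub => sub) = (pvCands lst 0).map (fun t => t.1) :=
    (pv_cands_map_fst lst 0).symm
  cases hcs : pvCands lst 0 with
  | nil =>
    simp only [hcs] at hA
    simp [hA, hflat, hcs]
  | cons c cs =>
    simp only [hcs, List.foldl_cons] at hA
    have hfold : cs.foldl pvStepB (pvStepB none c) = some (pvPick c cs) := by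
      simpa [pvStepB] using pv_foldl_pick cs c
    rw [hfold] at hA
    have hmax : PySem.List.max? (lst.flatMap (fun sub => sub)) (fun x => x)
        = some (pvPick c cs).1 := by
      rw [hflat, hcs, List.map_cons, PySem.List.max?_id_cons]
      exact congrArg some (pv_foldl_max_pick cs c)
    have hne : lst.flatMap (fun sub => sub) ≠ [] := by
      rw [hflat, hcs]; simp
    simp only [hA, if_neg hne, hmax]
    rw [pv_findrow_findc (pvPick c cs).1 lst 0, hcs]
    have := pv_pick_findc cs c
    rw [this]
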